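-- pv_equiv track=rewrite | github.com/LemonRAINqqq/Leetcode | 笔试/Sands.py | solution
-- ===== SOURCE A (Python) =====
-- def solution(S,s):
--     if not s:
--         return S
--
--     n = len(S)
--     index = {}
--     res = []
--
--     for i in range(n):
--         if S[i] in s:
-- #            if S[i] not in index:
--             index[S[i]] = i
--
--     if len(index) == len(s):
--         for key in index:
--             res.append(index[key])
--
--         res.sort()
--         res1 = S[res[0]:res[len(res)-1]+1]
--         return res1
--
--     else:
--         return ''
-- ===== SOURCE B (Python) =====
-- def solution(S, s):
--     if not s:
--         return S
--     positions = {}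
--     for c in s:
--         p = S.rfind(c)
--         if p >= 0:
--             positions[c] = p
--     if len(positions) == len(s):
--         return S[min(positions.values()):max(positions.values()) + 1]
--     return ''
-- ===== Notes on version B (the rewrite author's own statement) =====
-- stated objective: idiomatic
-- what changed: Instead of scanning S once recording last positions of characters of s and then sorting the collected positions to find the span's endpoints, B looks up each character of s with S.rfind and takes min/max of the recorded positions directly, with no sort and no scan of S's irrelevant characters.
import Mathlib
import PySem

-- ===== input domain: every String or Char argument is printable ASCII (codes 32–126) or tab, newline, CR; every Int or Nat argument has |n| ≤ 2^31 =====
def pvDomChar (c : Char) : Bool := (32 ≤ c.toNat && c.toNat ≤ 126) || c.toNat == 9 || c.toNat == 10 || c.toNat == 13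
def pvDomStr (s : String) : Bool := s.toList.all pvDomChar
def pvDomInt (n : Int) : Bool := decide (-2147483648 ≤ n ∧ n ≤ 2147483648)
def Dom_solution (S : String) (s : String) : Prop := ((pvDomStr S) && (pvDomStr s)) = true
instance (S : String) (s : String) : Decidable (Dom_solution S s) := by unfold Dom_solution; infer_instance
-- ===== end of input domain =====

-- B replaces A's forward scan of S plus a sort of the collected positions by per-character
-- S.rfind lookups and a direct min/max of the recorded positions (idiomatic rewrite, same cost class).

-- ===== PORT A =====
def pvIndexA (S : String) (s : String) : PySem.Dict Char Int :=
  (PySem.List.pyRange 0 ((S.toList.length : Nat) : Int) 1).foldl (fun d i =>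
    if PySem.Chars.isIn [PySem.List.pyGetD S.toList i ' '] s.toList then
      d.insert (PySem.List.pyGetD S.toList i ' ') i
    else d) PySem.Dict.empty

def pvResA (S : String) (s : String) : List Int :=
  (pvIndexA S s).keys.foldl (fun r k => r ++ [(pvIndexA S s).getD k 0]) []

def solution (S : String) (s : String) : String :=
  if s.toList = [] then S
  else if (pvIndexA S s).size = s.toList.length then
    let res := PySem.List.sorted (pvResA S s) (fun x => x) false
    PySem.Str.slice S (some (PySem.List.pyGetD res 0 0))
      (some (PySem.List.pyGetD res ((res.length : Int) - 1) 0 + 1))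
  else ""

-- ===== PORT B =====
def pvPositionsB (S : String) (s : String) : PySem.Dict Char Int :=
  s.toList.foldl (fun d c =>
    let p := PySem.Chars.rfind S.toList [c]
    if 0 ≤ p then d.insert c p else d) PySem.Dict.empty

def solution_alt (S : String) (s : String) : String :=
  if s.toList = [] then S
  else if (pvPositionsB S s).size = s.toList.length then
    match PySem.List.min? (pvPositionsB S s).values (fun x => x),
          PySem.List.max? (pvPositionsB S s).values (fun x => x) with
    | some lo, some hi => PySem.Str.slice S (some lo) (some (hi + 1))
    | _, _ => ""
  else ""


-- ===== PRECONDITION & SPEC =====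
def Spec_solution (S : String) (s : String) (out : String) : Prop := out = solution_alt S s
instance (S : String) (s : String) (out : String) : Decidable (Spec_solution S s out) := by unfold Spec_solution; infer_instance

-- ===== CLAIM (what is proved, stated in full; the proofs are below) =====
def Claim_equal_solution : Prop := ∀ (S : String) (s : String), Dom_solution S s → Spec_solution S s (solution S s)

-- ===== LEMMAS AND PROOFS =====

def lastL (T : List Char) (c : Char) : Nat → Int
  | 0 => -1
  | k+1 => if T[k]? = some c then (k : Int) else lastL T c k

theorem singleton_isPrefixOf (c : Char) (l : List Char) :
    ([c].isPrefixOf l = true) ↔ l[0]? = some c := by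
  cases l with
  | nil => simp [show ([c].isPrefixOf ([] : List Char)) = false from rfl]
  | cons x xs =>
    rw [show ([c].isPrefixOf (x :: xs)) = (c == x) from by
      show (c == x && List.isPrefixOf [] xs) = _; simp]
    simp only [List.getElem?_cons_zero, Option.some.injEq, beq_iff_eq]
    exact eq_comm

theorem rfind_go_eq (T : List Char) (c : Char) (k : Nat) :
    PySem.Chars.rfind.go T [c] k = lastL T c (k+1) := by
  induction k with
  | zero =>
    rw [PySem.Chars.rfind.go]
    simp only [lastL]
    by_cases h : T[0]? = some c
    · rw [if_pos ((singleton_isPrefixOf c T).mpr h), if_pos h]; rfl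
    · rw [if_neg (fun hp => h ((singleton_isPrefixOf c T).mp hp)), if_neg h]
  | succ j ih =>
    rw [PySem.Chars.rfind.go]
    simp only [lastL]
    have hdrop : (T.drop (j+1))[0]? = T[j+1]? := by simp
    by_cases h : T[j+1]? = some c
    · rw [if_pos (by rw [singleton_isPrefixOf, hdrop]; exact h), if_pos h]
    · rw [if_neg (fun hp => h (by rw [singleton_isPrefixOf, hdrop] at hp; exact hp)), if_neg h]
      exact ih

theorem rfind_eq_lastL (T : List Char) (c : Char) :
    PySem.Chars.rfind T [c] = lastL T c T.length := by
  show PySem.Chars.rfind.go T [c] T.length = _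
  rw [rfind_go_eq]
  simp [lastL]

theorem lastL_nonneg_succ (T : List Char) (c : Char) (m : Nat) (h : T[m]? = some c) :
    lastL T c (m+1) = (m : Int) := by simp [lastL, h]

theorem dictA_get? (S s : String) (m : Nat) (hm : m ≤ S.toList.length) (c : Char) :
    (((List.range m).map (fun (k : Nat) => (k : Int))).foldl
        (fun d i => if PySem.Chars.isIn [PySem.List.pyGetD S.toList i ' '] s.toList then
            d.insert (PySem.List.pyGetD S.toList i ' ') i else d) PySem.Dict.empty).get? c
      = if c ∈ s.toList ∧ 0 ≤ lastL S.toList c m then some (lastL S.toList c m) else none := by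
  induction m with
  | zero => simp [lastL, PySem.Dict.get?_empty]
  | succ m ih =>
    rw [List.range_succ, List.map_append, List.foldl_append]
    simp only [List.map_cons, List.map_nil, List.foldl_cons, List.foldl_nil]
    rw [PySem.List.pyGetD_natCast]
    have hmlt : m < S.toList.length := Nat.lt_of_succ_le hm
    have hgetd : S.toList.getD m ' ' = S.toList[m] := List.getD_eq_getElem _ _ hmlt
    rw [hgetd]
    have hsome : S.toList[m]? = some (S.toList[m]) := List.getElem?_eq_getElem hmlt
    have ih' := ih (Nat.le_of_succ_le hm)
    by_cases hmem : S.toList[m] ∈ s.toList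
    · rw [if_pos (by
        rw [PySem.Chars.isIn_iff_infix, List.singleton_infix_iff]; exact hmem)]
      rw [PySem.Dict.get?_insert]
      by_cases hc : c = S.toList[m]
      · subst hc
        rw [if_pos rfl, lastL_nonneg_succ _ _ _ hsome,
            if_pos ⟨hmem, Int.natCast_nonneg m⟩]
      · rw [if_neg hc, ih']
        have : lastL S.toList c (m+1) = lastL S.toList c m := by
          simp only [lastL, hsome]
          rw [if_neg (by simp [eq_comm, hc])]
        rw [this]
    · rw [if_neg (by
        rw [PySem.Chars.isIn_iff_infix, List.singleton_infix_iff]; exact hmem)]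
      rw [ih']
      by_cases hct : c ∈ s.toList
      · have hne : S.toList[m] ≠ c := fun h => hmem (h ▸ hct)
        have : lastL S.toList c (m+1) = lastL S.toList c m := by
          simp only [lastL, hsome]
          rw [if_neg (by simp [hne])]
        rw [this]
      · simp [hct]

theorem dictB_get? (S : String) (l : List Char) (d : PySem.Dict Char Int) (c : Char) :
    (l.foldl (fun d c =>
        let p := PySem.Chars.rfind S.toList [c]
        if 0 ≤ p then d.insert c p else d) d).get? c
      = if c ∈ l ∧ 0 ≤ PySem.Chars.rfind S.toList [c]
          then some (PySem.Chars.rfind S.toList [c]) else d.get? c := by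
  induction l generalizing d with
  | nil => simp
  | cons a l ih =>
    rw [List.foldl_cons, ih]
    by_cases hc : c ∈ l ∧ 0 ≤ PySem.Chars.rfind S.toList [c]
    · rw [if_pos hc, if_pos ⟨List.mem_cons_of_mem a hc.1, hc.2⟩]
    · rw [if_neg hc]
      dsimp only
      by_cases ha : 0 ≤ PySem.Chars.rfind S.toList [a]
      · rw [if_pos ha, PySem.Dict.get?_insert]
        by_cases hca : c = a
        · subst hca
          rw [if_pos rfl, if_pos ⟨List.mem_cons_self, ha⟩]
        · rw [if_neg hca, if_neg (by
            rintro ⟨hmem, hr⟩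
            rcases List.mem_cons.mp hmem with h | h
            · exact hca h
            · exact hc ⟨h, hr⟩)]
      · rw [if_neg ha, if_neg (by
          rintro ⟨hmem, hr⟩
          rcases List.mem_cons.mp hmem with h | h
          · subst h; exact ha hr
          · exact hc ⟨h, hr⟩)]


theorem get?_eq (S s : String) (c : Char) :
    (pvIndexA S s).get? c = (pvPositionsB S s).get? c := by
  rw [pvIndexA, pvPositionsB, PySem.List.pyRange_zero_natCast,
      dictA_get? S s S.toList.length le_rfl c, dictB_get? S s.toList PySem.Dict.empty c,
      rfind_eq_lastL, PySem.Dict.get?_empty]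

theorem nodup_keysA (S s : String) : (pvIndexA S s).keys.Nodup := by
  have h := PySem.List.foldl_if_eq_foldl_filter
    (p := fun i => PySem.Chars.isIn [PySem.List.pyGetD S.toList i ' '] s.toList)
    (f := fun (d : PySem.Dict Char Int) i => d.insert (PySem.List.pyGetD S.toList i ' ') i)
    (l := PySem.List.pyRange 0 ((S.toList.length : Nat) : Int) 1) (init := PySem.Dict.empty)
  beta_reduce at h
  rw [pvIndexA, h]
  exact PySem.Dict.nodup_keys_foldl_insert_key _
    (fun i => PySem.List.pyGetD S.toList i ' ') (fun _ i => i) _ PySem.Dict.nodup_keys_empty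

theorem nodup_keysB (S s : String) : (pvPositionsB S s).keys.Nodup := by
  have h := PySem.List.foldl_ite_eq_foldl_filter
    (p := fun c => 0 ≤ PySem.Chars.rfind S.toList [c])
    (f := fun (d : PySem.Dict Char Int) c => d.insert c (PySem.Chars.rfind S.toList [c]))
    (l := s.toList) (init := PySem.Dict.empty)
  beta_reduce at h
  rw [pvPositionsB, h]
  exact PySem.Dict.nodup_keys_foldl_insert _
    (fun _ c => PySem.Chars.rfind S.toList [c]) _ PySem.Dict.nodup_keys_empty

theorem keys_perm (S s : String) : (pvIndexA S s).keys.Perm (pvPositionsB S s).keys := by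
  rw [List.perm_ext_iff_of_nodup (nodup_keysA S s) (nodup_keysB S s)]
  intro c
  constructor
  · intro h
    by_contra hB
    rw [← PySem.Dict.get?_eq_none_iff_not_mem_keys] at hB
    rw [← get?_eq, PySem.Dict.get?_eq_none_iff_not_mem_keys] at hB
    exact hB h
  · intro h
    by_contra hA
    rw [← PySem.Dict.get?_eq_none_iff_not_mem_keys, get?_eq,
        PySem.Dict.get?_eq_none_iff_not_mem_keys] at hA
    exact hA h

theorem size_eq (S s : String) : (pvIndexA S s).size = (pvPositionsB S s).size := by
  have h := (keys_perm S s).length_eq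
  simpa [PySem.Dict.keys, PySem.Dict.size] using h

theorem getD_eq (S s : String) (c : Char) :
    (pvIndexA S s).getD c 0 = (pvPositionsB S s).getD c 0 := by
  rw [PySem.Dict.getD_eq_get?_getD, PySem.Dict.getD_eq_get?_getD, get?_eq]

theorem resA_perm_valuesB (S s : String) :
    (pvResA S s).Perm (pvPositionsB S s).values := by
  rw [pvResA, PySem.List.foldl_append_singleton_eq_map, List.nil_append,
      PySem.Dict.values_eq_map_keys _ (nodup_keysB S s) 0]
  have h1 : (pvPositionsB S s).keys.map (fun k => (pvPositionsB S s).getD k 0)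
      = (pvPositionsB S s).keys.map (fun k => (pvIndexA S s).getD k 0) :=
    List.map_congr_left (fun x _ => (getD_eq S s x).symm)
  rw [h1]
  exact (keys_perm S s).map _

theorem sorted_zero_eq_min (xs v : List Int) (lo : Int)
    (hperm : (PySem.List.sorted xs (fun x => x) false).Perm v)
    (hmin : PySem.List.min? v (fun x => x) = some lo)
    (h0 : 0 < (PySem.List.sorted xs (fun x => x) false).length) :
    (PySem.List.sorted xs (fun x => x) false)[0] = lo := by
  have h1 : lo ≤ (PySem.List.sorted xs (fun x => x) false)[0] :=
    PySem.List.min?_isMin hmin _ (hperm.mem_iff.mp (List.getElem_mem h0))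
  obtain ⟨q, hq, hq2⟩ := List.getElem_of_mem (hperm.mem_iff.mpr (PySem.List.min?_mem hmin))
  have h2 := PySem.List.sorted_id_getElem_mono xs (Nat.zero_le q) hq
  rw [hq2] at h2
  exact le_antisymm h2 h1

theorem sorted_last_eq_max (xs v : List Int) (hi : Int)
    (hperm : (PySem.List.sorted xs (fun x => x) false).Perm v)
    (hmax : PySem.List.max? v (fun x => x) = some hi)
    (h0 : 0 < (PySem.List.sorted xs (fun x => x) false).length) :
    (PySem.List.sorted xs (fun x => x) false)[(PySem.List.sorted xs (fun x => x) false).length - 1] = hi := by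
  have hlt : (PySem.List.sorted xs (fun x => x) false).length - 1
      < (PySem.List.sorted xs (fun x => x) false).length := by omega
  have h1 : (PySem.List.sorted xs (fun x => x) false)[(PySem.List.sorted xs (fun x => x) false).length - 1] ≤ hi :=
    PySem.List.max?_isMax hmax _ (hperm.mem_iff.mp (List.getElem_mem hlt))
  obtain ⟨q, hq, hq2⟩ := List.getElem_of_mem (hperm.mem_iff.mpr (PySem.List.max?_mem hmax))
  have h2 := PySem.List.sorted_id_getElem_mono xs (Nat.le_sub_one_of_lt hq) hlt
  rw [hq2] at h2
  exact le_antisymm h1 h2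

theorem solution_spec' (S s : String) : solution S s = solution_alt S s := by
  by_cases hs : s.toList = []
  · simp [solution, solution_alt, hs]
  rw [solution, solution_alt, if_neg hs, if_neg hs, size_eq]
  by_cases hg : (pvPositionsB S s).size = s.toList.length
  case neg => rw [if_neg hg, if_neg hg]
  rw [if_pos hg, if_pos hg]
  have hvlen : (pvPositionsB S s).values.length = (pvPositionsB S s).size := by
    simp [PySem.Dict.values, PySem.Dict.size]
  have htpos : 0 < s.toList.length := List.length_pos_iff.mpr hs
  have hvne : (pvPositionsB S s).values ≠ [] := by
    intro h
    rw [h] at hvlen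
    simp at hvlen
    omega
  obtain ⟨lo, hmin⟩ : ∃ lo, PySem.List.min? (pvPositionsB S s).values (fun x => x) = some lo := by
    rcases h : PySem.List.min? (pvPositionsB S s).values (fun x => x) with _ | lo
    · rw [PySem.List.min?_eq_none_iff] at h
      exact absurd h hvne
    · exact ⟨lo, rfl⟩
  obtain ⟨hi, hmax⟩ : ∃ hi, PySem.List.max? (pvPositionsB S s).values (fun x => x) = some hi := by
    rcases h : PySem.List.max? (pvPositionsB S s).values (fun x => x) with _ | hi
    · rw [PySem.List.max?_eq_none_iff] at h
      exact absurd h hvne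
    · exact ⟨hi, rfl⟩
  rw [hmin, hmax]
  simp only []
  have hperm : (PySem.List.sorted (pvResA S s) (fun x => x) false).Perm (pvPositionsB S s).values :=
    (PySem.List.sorted_perm _ _ _).trans (resA_perm_valuesB S s)
  have hpos : 0 < (PySem.List.sorted (pvResA S s) (fun x => x) false).length := by
    rw [hperm.length_eq, hvlen, hg]
    exact htpos
  have h0 := sorted_zero_eq_min (pvResA S s) _ lo hperm hmin hpos
  have h1 := sorted_last_eq_max (pvResA S s) _ hi hperm hmax hpos
  have e0 : PySem.List.pyGetD (PySem.List.sorted (pvResA S s) (fun x => x) false) 0 0 = lo := by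
    rw [PySem.List.pyGetD_eq_getElem _ _ (le_refl 0) (by exact_mod_cast hpos)]
    exact h0
  have e1 : PySem.List.pyGetD (PySem.List.sorted (pvResA S s) (fun x => x) false)
      (((PySem.List.sorted (pvResA S s) (fun x => x) false).length : Int) - 1) 0 = hi := by
    rw [← Nat.cast_pred hpos, PySem.List.pyGetD_natCast,
        List.getD_eq_getElem _ _ (by omega)]
    exact h1
  rw [e0, e1]

-- ===== VERDICT (by name: the statement is the Claim_ definition above) =====
theorem solution_spec : Claim_equal_solution := by
  intro S s _
  unfold Spec_solution
  exact solution_spec' S s
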